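-- pv_equiv track=rewrite | github.com/evancchow/jazzml | code/extract/chordclf_music.py | genAltered
-- ===== SOURCE A (Python) =====
-- def genAltered(note='C3'):
--     # In case you have to convert a note (e.g. F#) into form below
--     def convertSharps(note):
--         pitch = ''.join([i for i in note if i.isdigit() is False])
--         enharmonic = {"C#" : "D-", "D#" : "E-", "E#" : "F", "F#" : "G-", "G#" : "A-", "A#" : "B-", "B#" : "C"}
--         if '#' in pitch: return enharmonic[pitch]
--         return pitch
--
--     # Get scale with dictionary. For example: allscales[note[:-1]]
--     allscales = {
--         "C"  : ["C3", "E-3", "F3", "G3", "B-3",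
--                 "C4", "E-4", "F4", "G4", "B-4",
--                 "C5", "E-5", "F5", "G5", "B-5",
--                 "C6", "E-6", "F6", "G6", "B-6"],
--         "D-" : ["D-3", "E3", "G-3", "A-3", "B3",
--                 "D-4", "E4", "G-4", "A-4", "B4",
--                 "D-5", "E5", "G-5", "A-5", "B5",
--                 "D-6", "E6", "G-6", "A-6", "B6"],
--         "D"  : ["C3", "D3", "F3", "G3", "A3",
--                 "C4", "D4", "F4", "G4", "A4",
--                 "C5", "D5", "F5", "G5", "A5",
--                 "C6", "D6", "F6", "G6", "A6"],
--         "E-" : ["D-3", "E-3", "G-3", "A-3", "B-3",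
--                 "D-4", "E-4", "G-4", "A-4", "B-4",
--                 "D-5", "E-5", "G-5", "A-5", "B-5",
--                 "D-6", "E-6", "G-6", "A-6", "B-6"],
--         "E"  : ["D3", "E3", "G3", "A3", "B3",
--                 "D4", "E4", "G4", "A4", "B4",
--                 "D5", "E5", "G5", "A5", "B5",
--                 "D6", "E6", "G6", "A6", "B6"],
--         "F"  : ["C3", "E-3", "F3", "A-3", "B-3",
--                 "C4", "E-4", "F4", "A-4", "B-4",
--                 "C5", "E-5", "F5", "A-5", "B-5",
--                 "C6", "E-6", "F6", "A-6", "B-6"],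
--         "G-" : ["D-3", "E3", "G-3", "A3", "B3",
--                 "D-4", "E4", "G-4", "A4", "B4",
--                 "D-5", "E5", "G-5", "A5", "B5",
--                 "D-6", "E6", "G-6", "A6", "B6"],
--         "G"  : ["C3", "D3", "F3", "G3", "B-3",
--                 "C4", "D4", "F4", "G4", "B-4",
--                 "C5", "D5", "F5", "G5", "B-5",
--                 "C6", "D6", "F6", "G6", "B-6"],
--         "A-" : ["D-3", "E-3", "G-3", "A-3", "B3",
--                 "D-4", "E-4", "G-4", "A-4", "B4",
--                 "D-5", "E-5", "G-5", "A-5", "B5",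
--                 "D-6", "E-6", "G-6", "A-6", "B6"],
--         "A"  : ["C3", "D3", "E3", "G3", "A3",
--                 "C4", "D4", "E4", "G4", "A4",
--                 "C5", "D5", "E5", "G5", "A5",
--                 "C6", "D6", "E6", "G6", "A6"],
--         "B-" : ["D-3", "E-3", "F3", "A-3", "B-3",
--                 "D-4", "E-4", "F4", "A-4", "B-4",
--                 "D-5", "E-5", "F5", "A-5", "B-5",
--                 "D-6", "E-6", "F6", "A-6", "B-6"],
--         "B"  : ["D3", "E3", "G-3", "A3", "B3",
--                 "D4", "E4", "G-4", "A4", "B4",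
--                 "D5", "E5", "G-5", "A5", "B5",
--                 "D6", "E6", "G-6", "A6", "B6"]}
--     pitch = ''.join([i for i in note if i.isdigit() is False])
--     pitch = convertSharps(note) # Rm. octaveinfo, eg. G-5 --> G-, G5->G
--     return allscales[pitch]
-- ===== SOURCE B (Python) =====
-- def genAltered(note='C3'):
--     # Simpler: 5 base note names per key, result built by looping octaves 3..6.
--     def convertSharps(note):
--         pitch = ''.join([i for i in note if i.isdigit() is False])
--         enharmonic = {"C#" : "D-", "D#" : "E-", "E#" : "F", "F#" : "G-", "G#" : "A-", "A#" : "B-", "B#" : "C"}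
--         if '#' in pitch: return enharmonic[pitch]
--         return pitch
--
--     bases = {
--         "C":  ["C", "E-", "F", "G", "B-"],
--         "D-": ["D-", "E", "G-", "A-", "B"],
--         "D":  ["C", "D", "F", "G", "A"],
--         "E-": ["D-", "E-", "G-", "A-", "B-"],
--         "E":  ["D", "E", "G", "A", "B"],
--         "F":  ["C", "E-", "F", "A-", "B-"],
--         "G-": ["D-", "E", "G-", "A", "B"],
--         "G":  ["C", "D", "F", "G", "B-"],
--         "A-": ["D-", "E-", "G-", "A-", "B"],
--         "A":  ["C", "D", "E", "G", "A"],
--         "B-": ["D-", "E-", "F", "A-", "B-"],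
--         "B":  ["D", "E", "G-", "A", "B"]}
--
--     pitch = convertSharps(note)
--     names = bases[pitch]
--     return [f"{n}{o}" for o in (3, 4, 5, 6) for n in names]
-- ===== Notes on version B (the rewrite author's own statement) =====
-- stated objective: simpler
-- what changed: Replaced the 20-entry-per-key scale table with a compact dict of 5 base note names per key and built the result by looping octaves 3..6 over those names.
import Mathlib
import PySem

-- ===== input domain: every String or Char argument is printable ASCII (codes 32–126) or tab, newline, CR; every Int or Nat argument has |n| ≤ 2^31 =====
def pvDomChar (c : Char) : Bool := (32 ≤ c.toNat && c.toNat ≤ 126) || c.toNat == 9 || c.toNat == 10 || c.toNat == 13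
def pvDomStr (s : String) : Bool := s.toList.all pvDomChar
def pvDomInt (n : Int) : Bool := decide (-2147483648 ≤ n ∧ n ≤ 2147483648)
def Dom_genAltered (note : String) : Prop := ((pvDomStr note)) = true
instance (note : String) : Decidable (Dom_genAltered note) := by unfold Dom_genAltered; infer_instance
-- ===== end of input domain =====

-- B replaces A's 20-entry-per-key scale table by 5 base names per key plus an octave loop (simpler).

-- Both Pythons contain the same pitch-extraction code ''.join([i for i in note if i.isdigit() is False]);
-- A computes it twice (outer and inside convertSharps) with identical result, ported once here.
def pvPitchOf (note : String) : String :=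
  String.ofList (note.toList.filter (fun c => !PySem.Chars.isdigit c))

-- Both Pythons contain the identical inner helper convertSharps; `none` = KeyError (excluded by Pre_).
def pvConvertSharps (note : String) : Option String :=
  let pitch := pvPitchOf note
  let enharmonic : PySem.Dict String String := PySem.Dict.ofList
    [("C#", "D-"), ("D#", "E-"), ("E#", "F"), ("F#", "G-"), ("G#", "A-"), ("A#", "B-"), ("B#", "C")]
  if PySem.Chars.isIn ['#'] pitch.toList then enharmonic.get? pitch else some pitch

-- ===== PORT A =====
def genAltered (note : String) : List String :=
  let allscales : PySem.Dict String (List String) := PySem.Dict.ofList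
    [ ("C",  ["C3", "E-3", "F3", "G3", "B-3", "C4", "E-4", "F4", "G4", "B-4",
              "C5", "E-5", "F5", "G5", "B-5", "C6", "E-6", "F6", "G6", "B-6"]),
      ("D-", ["D-3", "E3", "G-3", "A-3", "B3", "D-4", "E4", "G-4", "A-4", "B4",
              "D-5", "E5", "G-5", "A-5", "B5", "D-6", "E6", "G-6", "A-6", "B6"]),
      ("D",  ["C3", "D3", "F3", "G3", "A3", "C4", "D4", "F4", "G4", "A4",
              "C5", "D5", "F5", "G5", "A5", "C6", "D6", "F6", "G6", "A6"]),
      ("E-", ["D-3", "E-3", "G-3", "A-3", "B-3", "D-4", "E-4", "G-4", "A-4", "B-4",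
              "D-5", "E-5", "G-5", "A-5", "B-5", "D-6", "E-6", "G-6", "A-6", "B-6"]),
      ("E",  ["D3", "E3", "G3", "A3", "B3", "D4", "E4", "G4", "A4", "B4",
              "D5", "E5", "G5", "A5", "B5", "D6", "E6", "G6", "A6", "B6"]),
      ("F",  ["C3", "E-3", "F3", "A-3", "B-3", "C4", "E-4", "F4", "A-4", "B-4",
              "C5", "E-5", "F5", "A-5", "B-5", "C6", "E-6", "F6", "A-6", "B-6"]),
      ("G-", ["D-3", "E3", "G-3", "A3", "B3", "D-4", "E4", "G-4", "A4", "B4",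
              "D-5", "E5", "G-5", "A5", "B5", "D-6", "E6", "G-6", "A6", "B6"]),
      ("G",  ["C3", "D3", "F3", "G3", "B-3", "C4", "D4", "F4", "G4", "B-4",
              "C5", "D5", "F5", "G5", "B-5", "C6", "D6", "F6", "G6", "B-6"]),
      ("A-", ["D-3", "E-3", "G-3", "A-3", "B3", "D-4", "E-4", "G-4", "A-4", "B4",
              "D-5", "E-5", "G-5", "A-5", "B5", "D-6", "E-6", "G-6", "A-6", "B6"]),
      ("A",  ["C3", "D3", "E3", "G3", "A3", "C4", "D4", "E4", "G4", "A4",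
              "C5", "D5", "E5", "G5", "A5", "C6", "D6", "E6", "G6", "A6"]),
      ("B-", ["D-3", "E-3", "F3", "A-3", "B-3", "D-4", "E-4", "F4", "A-4", "B-4",
              "D-5", "E-5", "F5", "A-5", "B-5", "D-6", "E-6", "F6", "A-6", "B-6"]),
      ("B",  ["D3", "E3", "G-3", "A3", "B3", "D4", "E4", "G-4", "A4", "B4",
              "D5", "E5", "G-5", "A5", "B5", "D6", "E6", "G-6", "A6", "B6"]) ]
  match pvConvertSharps note with
  | none => []                                   -- KeyError inside convertSharps (outside Pre_)
  | some pitch => (allscales.get? pitch).getD [] -- getD []: KeyError on missing key (outside Pre_)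

-- ===== PORT B =====
def genAltered_alt (note : String) : List String :=
  let bases : PySem.Dict String (List String) := PySem.Dict.ofList
    [ ("C",  ["C", "E-", "F", "G", "B-"]),
      ("D-", ["D-", "E", "G-", "A-", "B"]),
      ("D",  ["C", "D", "F", "G", "A"]),
      ("E-", ["D-", "E-", "G-", "A-", "B-"]),
      ("E",  ["D", "E", "G", "A", "B"]),
      ("F",  ["C", "E-", "F", "A-", "B-"]),
      ("G-", ["D-", "E", "G-", "A", "B"]),
      ("G",  ["C", "D", "F", "G", "B-"]),
      ("A-", ["D-", "E-", "G-", "A-", "B"]),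
      ("A",  ["C", "D", "E", "G", "A"]),
      ("B-", ["D-", "E-", "F", "A-", "B-"]),
      ("B",  ["D", "E", "G-", "A", "B"]) ]
  match pvConvertSharps note with
  | none => []                                   -- KeyError inside convertSharps (outside Pre_)
  | some pitch =>
    let names := (bases.get? pitch).getD []      -- getD []: KeyError on missing key (outside Pre_)
    ([3, 4, 5, 6] : List Int).flatMap (fun o => names.map (fun n => n ++ PySem.Int.toStr o))

-- ===== PRECONDITION & SPEC =====
-- Pre_ excludes exactly the inputs on which Python A raises KeyError: notes whose digit-stripped
-- pitch is neither one of the 12 scale keys nor one of the 7 sharp names convertSharps accepts.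
def Pre_genAltered (note : String) : Prop :=
  pvPitchOf note ∈ ["C", "D-", "D", "E-", "E", "F", "G-", "G", "A-", "A", "B-", "B",
                    "C#", "D#", "E#", "F#", "G#", "A#", "B#"]
instance (note : String) : Decidable (Pre_genAltered note) := by unfold Pre_genAltered; infer_instance

def pvWitness_genAltered : String := "F#4"

def Spec_genAltered (note : String) (out : List String) : Prop := out = genAltered_alt note
instance (note : String) (out : List String) : Decidable (Spec_genAltered note out) := by unfold Spec_genAltered; infer_instance

-- ===== CLAIM (what is proved, stated in full; the proofs are below) =====
def Claim_equal_genAltered : Prop := ∀ (note : String), Dom_genAltered note → Pre_genAltered note → Spec_genAltered note (genAltered note)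

-- ===== LEMMAS AND PROOFS =====

-- ===== VERDICT (by name: the statement is the Claim_ definition above) =====
theorem genAltered_spec : Claim_equal_genAltered := by
  intro note _ hpre
  unfold Spec_genAltered genAltered genAltered_alt
  unfold Pre_genAltered at hpre
  unfold pvConvertSharps
  generalize hp : pvPitchOf note = p at hpre ⊢
  simp only [List.mem_cons, List.not_mem_nil, or_false] at hpre
  rcases hpre with h|h|h|h|h|h|h|h|h|h|h|h|h|h|h|h|h|h|h <;> subst h <;> decide
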